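-- pv_equiv track=rewrite | github.com/luizsfjr/Brazilian-news-from-international-vehicles | schema_detector/main.py | patch_sqlx
-- ===== SOURCE A (Python) =====
-- def patch_sqlx(content: str, added: list, removed: list, modified: list, version: int) -> str:
--     """
--     Since silver uses SELECT *, the SQLX logic stays the same.
--     We update the assertions block to flag new non-null candidates
--     and add a schema change comment for reviewer awareness.
--     """
--     lines = content.splitlines()
--
--     # Build change summary comment
--     summary_lines = [f"// schema-evolution: v{version}"]
--     if added:
--         cols = ", ".join(f["name"] for f in added)
--         summary_lines.append(f"// Added columns   : {cols}")
--     if removed: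
--         cols = ", ".join(f["name"] for f in removed)
--         summary_lines.append(f"// Removed columns : {cols}")
--     if modified:
--         cols = ", ".join(f["name"] for f in modified)
--         summary_lines.append(f"// Modified columns: {cols}")
--     summary_lines.append("// Review: update assertions/docs if needed.")
--     comment_block = "\n".join(summary_lines)
--
--     # Insert comment right after the closing brace of the config block
--     result   = []
--     in_config = False
--     brace_depth = 0
--     inserted  = False
--
--     for line in lines:
--         result.append(line)
--         if not inserted:
--             if "config {" in line:
--                 in_config   = True
--                 brace_depth = 1
--             elif in_config:
--                 brace_depth += line.count("{") - line.count("}")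
--                 if brace_depth == 0:
--                     result.append("")
--                     result.append(comment_block)
--                     result.append("")
--                     in_config = False
--                     inserted  = True
--
--     return "\n".join(result)
-- ===== SOURCE B (Python) =====
-- def patch_sqlx(content: str, added: list, removed: list, modified: list, version: int) -> str:
--     lines = content.splitlines()
--
--     # Build change summary comment (table-driven instead of three if-blocks)
--     summary_lines = [f"// schema-evolution: v{version}"]
--     for label, group in (("// Added columns   : ", added),
--                          ("// Removed columns : ", removed),
--                          ("// Modified columns: ", modified)):
--         if group:
--             summary_lines.append(label + ", ".join(f["name"] for f in group))
--     summary_lines.append("// Review: update assertions/docs if needed.")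
--     comment_block = "\n".join(summary_lines)
--
--     # Locate the line closing the first config block, then splice once
--     idx = None
--     in_config = False
--     depth = 0
--     for i, line in enumerate(lines):
--         if "config {" in line:
--             in_config = True
--             depth = 1
--         elif in_config:
--             depth += line.count("{") - line.count("}")
--             if depth == 0:
--                 idx = i
--                 break
--     if idx is None:
--         return "\n".join(lines)
--     return "\n".join(lines[:idx + 1] + ["", comment_block, ""] + lines[idx + 1:])
-- ===== Notes on version B (the rewrite author's own statement) =====
-- stated objective: simpler
-- what changed: B replaces A's build-result-while-scanning loop (with in_config/inserted flags threaded through the whole traversal) by a scan that only locates the index of the line closing the first config block and then splices the comment in with one slice operation, and replaces the three copy-pasted summary if-blocks by a single table-driven loop.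
import Mathlib
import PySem

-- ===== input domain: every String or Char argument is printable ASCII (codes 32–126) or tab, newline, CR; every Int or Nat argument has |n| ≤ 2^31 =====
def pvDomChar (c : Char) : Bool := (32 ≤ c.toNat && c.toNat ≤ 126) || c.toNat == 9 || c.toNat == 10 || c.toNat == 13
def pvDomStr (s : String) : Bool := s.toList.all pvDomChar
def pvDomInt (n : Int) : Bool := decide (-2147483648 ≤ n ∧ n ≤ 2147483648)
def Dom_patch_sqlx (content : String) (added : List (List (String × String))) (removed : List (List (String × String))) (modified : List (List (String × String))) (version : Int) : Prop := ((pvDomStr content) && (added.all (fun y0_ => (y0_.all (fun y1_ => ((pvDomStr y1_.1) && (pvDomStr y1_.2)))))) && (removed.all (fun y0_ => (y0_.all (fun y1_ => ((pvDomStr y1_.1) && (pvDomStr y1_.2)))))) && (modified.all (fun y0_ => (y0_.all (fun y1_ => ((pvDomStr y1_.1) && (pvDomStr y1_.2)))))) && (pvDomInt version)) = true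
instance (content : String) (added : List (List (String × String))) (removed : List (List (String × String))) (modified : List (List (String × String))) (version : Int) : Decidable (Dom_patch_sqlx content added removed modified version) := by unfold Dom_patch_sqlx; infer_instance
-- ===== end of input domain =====

-- B replaces A's build-while-scanning loop by a find-the-closing-line scan plus one splice,
-- and the three copy-pasted summary if-blocks by one table-driven fold (objective: simpler).

-- ", ".join(f["name"] for f in group)  — shared by both sources verbatim
def pvNames (group : List (List (String × String))) : String :=
  PySem.Str.join ", " (group.map (fun f => ((PySem.Dict.mk f).get? "name").getD ""))

-- ===== PORT A =====
-- A's comment block: three sequential 'if group:' appends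
def pvSummaryA (added removed modified : List (List (String × String))) (version : Int) : String :=
  let s := ["// schema-evolution: v" ++ PySem.Int.toStr version]
  let s := if added ≠ [] then s ++ ["// Added columns   : " ++ pvNames added] else s
  let s := if removed ≠ [] then s ++ ["// Removed columns : " ++ pvNames removed] else s
  let s := if modified ≠ [] then s ++ ["// Modified columns: " ++ pvNames modified] else s
  PySem.Str.join "\n" (s ++ ["// Review: update assertions/docs if needed."])

-- A's single loop: state (result, in_config, brace_depth, inserted)
def pvLoopA (comment : String) : List String → (List String × Bool × Int × Bool) → (List String × Bool × Int × Bool)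
  | [], st => st
  | line :: rest, (res, inc, d, ins) =>
    let res := res ++ [line]
    if ins then pvLoopA comment rest (res, inc, d, ins)
    else if PySem.Str.isIn "config {" line then pvLoopA comment rest (res, true, 1, ins)
    else if inc then
      let d := d + (PySem.Str.count line "{" : Int) - (PySem.Str.count line "}" : Int)
      if d = 0 then pvLoopA comment rest (res ++ ["", comment, ""], false, d, true)
      else pvLoopA comment rest (res, inc, d, ins)
    else pvLoopA comment rest (res, inc, d, ins)

def patch_sqlx (content : String) (added : List (List (String × String))) (removed : List (List (String × String))) (modified : List (List (String × String))) (version : Int) : String :=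
  let lines := PySem.Str.splitlines content
  let comment := pvSummaryA added removed modified version
  PySem.Str.join "\n" (pvLoopA comment lines ([], false, 0, false)).1

-- ===== PORT B =====
-- B's comment block: fold over a (label, group) table
def pvSummaryB (added removed modified : List (List (String × String))) (version : Int) : String :=
  let rows := [("// Added columns   : ", added), ("// Removed columns : ", removed), ("// Modified columns: ", modified)]
  let s := rows.foldl (fun acc p => if p.2 ≠ [] then acc ++ [p.1 ++ pvNames p.2] else acc)
             ["// schema-evolution: v" ++ PySem.Int.toStr version]
  PySem.Str.join "\n" (s ++ ["// Review: update assertions/docs if needed."])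

-- B's scan: index (enumerate + break) of the line closing the first config block, if any
def pvFindClose : List String → Bool → Int → Nat → Option Nat
  | [], _, _, _ => none
  | line :: rest, inc, d, i =>
    if PySem.Str.isIn "config {" line then pvFindClose rest true 1 (i + 1)
    else if inc then
      let d := d + (PySem.Str.count line "{" : Int) - (PySem.Str.count line "}" : Int)
      if d = 0 then some i else pvFindClose rest true d (i + 1)
    else pvFindClose rest inc d (i + 1)

def patch_sqlx_alt (content : String) (added : List (List (String × String))) (removed : List (List (String × String))) (modified : List (List (String × String))) (version : Int) : String :=
  let lines := PySem.Str.splitlines content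
  let comment := pvSummaryB added removed modified version
  match pvFindClose lines false 0 0 with
  | none => PySem.Str.join "\n" lines
  | some i =>
    -- lines[:i+1] / lines[i+1:] with 0 ≤ i+1 ≤ len: exactly List.take / List.drop
    PySem.Str.join "\n" (lines.take (i + 1) ++ ["", comment, ""] ++ lines.drop (i + 1))

-- ===== PRECONDITION & SPEC =====
-- Pre_ excludes exactly the inputs on which Python A raises KeyError: a column dict without a "name" key.
def Pre_patch_sqlx (content : String) (added : List (List (String × String))) (removed : List (List (String × String))) (modified : List (List (String × String))) (version : Int) : Prop :=
  ((added ++ removed ++ modified).all (fun f => (PySem.Dict.mk f).contains "name")) = true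
instance (content : String) (added : List (List (String × String))) (removed : List (List (String × String))) (modified : List (List (String × String))) (version : Int) : Decidable (Pre_patch_sqlx content added removed modified version) := by unfold Pre_patch_sqlx; infer_instance

def pvWitness_patch_sqlx : String × (List (List (String × String))) × (List (List (String × String))) × (List (List (String × String))) × Int :=
  ("config {\n}", [[("name", "a")]], [], [], 1)

def Spec_patch_sqlx (content : String) (added : List (List (String × String))) (removed : List (List (String × String))) (modified : List (List (String × String))) (version : Int) (out : String) : Prop := out = patch_sqlx_alt content added removed modified version
instance (content : String) (added : List (List (String × String))) (removed : List (List (String × String))) (modified : List (List (String × String))) (version : Int) (out : String) : Decidable (Spec_patch_sqlx content added removed modified version out) := by unfold Spec_patch_sqlx; infer_instance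

-- ===== CLAIM (what is proved, stated in full; the proofs are below) =====
def Claim_equal_patch_sqlx : Prop := ∀ (content : String) (added : List (List (String × String))) (removed : List (List (String × String))) (modified : List (List (String × String))) (version : Int), Dom_patch_sqlx content added removed modified version → Pre_patch_sqlx content added removed modified version → Spec_patch_sqlx content added removed modified version (patch_sqlx content added removed modified version)

-- ===== LEMMAS AND PROOFS =====

theorem pvSummary_eq (added removed modified : List (List (String × String))) (version : Int) :
    pvSummaryA added removed modified version = pvSummaryB added removed modified version := by
  simp [pvSummaryA, pvSummaryB, List.foldl]

theorem pvFindClose_shift (lines : List String) (inc : Bool) (d : Int) (i : Nat) :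
    pvFindClose lines inc d i = (pvFindClose lines inc d 0).map (· + i) := by
  induction lines generalizing inc d i with
  | nil => simp [pvFindClose]
  | cons line rest ih =>
    simp only [pvFindClose]
    split_ifs with h1 h2 h3
    · rw [ih _ _ (i + 1), ih _ _ 1]
      cases pvFindClose rest true 1 0 <;> simp <;> omega
    · simp
    · rw [ih _ _ (i + 1), ih _ _ 1]
      cases pvFindClose rest true _ 0 <;> simp <;> omega
    · rw [ih _ _ (i + 1), ih _ _ 1]
      cases pvFindClose rest inc d 0 <;> simp <;> omega

theorem pvLoopA_inserted (comment : String) (lines : List String) (res : List String) (inc : Bool) (d : Int) :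
    (pvLoopA comment lines (res, inc, d, true)).1 = res ++ lines := by
  induction lines generalizing res inc d with
  | nil => simp [pvLoopA]
  | cons line rest ih => simp [pvLoopA, ih]

theorem pvLoopA_eq (comment : String) (lines : List String) (res : List String) (inc : Bool) (d : Int) :
    (pvLoopA comment lines (res, inc, d, false)).1 =
      match pvFindClose lines inc d 0 with
      | none => res ++ lines
      | some i => res ++ (lines.take (i + 1) ++ ["", comment, ""] ++ lines.drop (i + 1)) := by
  induction lines generalizing res inc d with
  | nil => simp [pvLoopA, pvFindClose]
  | cons line rest ih =>
    simp only [pvLoopA, pvFindClose, if_neg Bool.false_ne_true]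
    split_ifs with h1 h2 h3
    · rw [ih, pvFindClose_shift rest true 1 1]
      cases pvFindClose rest true 1 0 <;> simp
    · rw [pvLoopA_inserted]
      simp
    · subst h2
      rw [ih, pvFindClose_shift rest true _ 1]
      cases pvFindClose rest true _ 0 <;> simp [PySem.Str.count]
    · rw [ih, pvFindClose_shift rest inc d 1]
      cases pvFindClose rest inc d 0 <;> simp

-- ===== VERDICT (by name: the statement is the Claim_ definition above) =====
theorem patch_sqlx_spec : Claim_equal_patch_sqlx := by
  intro content added removed modified version _ _
  unfold Spec_patch_sqlx patch_sqlx patch_sqlx_alt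
  dsimp only
  rw [pvSummary_eq, pvLoopA_eq]
  cases pvFindClose (PySem.Str.splitlines content) false 0 0 <;> simp
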